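-- pv_equiv track=rewrite | github.com/hanbinchoi/algorithms_practice | wtest/5.py | solution
-- ===== SOURCE A (Python) =====
-- def solution(rows, columns):
--     answer = [[0 for i in range(columns)]for i in range(rows)]
--
--     answer[0][0] = 1
--     now = 1
--     r = 0
--     c = 0
--     visited = []
--     while True:
--         zCnt = 0
--         for i in answer:
--             zCnt += i.count(0)
--         if zCnt == 0:
--             break
--         if now%2 == 1:
--             prev_r = r
--             prev_c = c
--             c += 1
--             if c == columns: c = 0
--             if [prev_r,prev_c,r,c] in visited:
--                 answer[prev_r][prev_c] = now - len(visited)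
--                 break
--             visited.append([prev_r,prev_c,r,c])
--         else:
--             prev_r = r
--             prev_c = c
--             r += 1
--             if r == rows: r = 0
--             if [prev_r,prev_c,r,c] in visited:
--                 answer[prev_r][prev_c] = now - len(visited)
--                 break
--             visited.append([prev_r,prev_c,r,c])
--         now+=1
--         answer[r][c] = now
--     return answer
-- ===== SOURCE B (Python) =====
-- from math import gcd
--
-- def solution(rows, columns):
--     # Number-theoretic reconstruction instead of a stateful walk: the position
--     # after m moves is ((m//2) % rows, ((m+1)//2) % columns) in closed form, and
--     # the (position, direction) state is periodic with period 2*lcm(rows, columns),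
--     # which is exactly when A's repeated-edge break fires; so no visited-edge set,
--     # no cycle detection and no per-step zero rescan are needed.
--     period = 2 * rows * columns // gcd(rows, columns)  # 2 * lcm
--
--     def pos(m):
--         return (m // 2) % rows, ((m + 1) // 2) % columns
--
--     # Last move actually written: the first m at which every cell has been
--     # touched, or the whole period (minus the closing duplicate) otherwise.
--     last = period - 1
--     seen = set()
--     for m in range(period):
--         seen.add(pos(m))
--         if len(seen) == rows * columns:
--             last = m
--             break
--
--     grid = [[0] * columns for _ in range(rows)]
--     for m in range(last + 1):
--         i, j = pos(m)
--         grid[i][j] = m + 1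
--     return grid
-- ===== Notes on version B (the rewrite author's own statement) =====
-- stated objective: faster
-- what changed: A walks the grid step by step, rescanning the whole grid for zeros and scanning a growing visited-edge list at every step; B reconstructs the path arithmetically - position after m moves is ((m//2)%rows, ((m+1)//2)%columns) - and replaces A's repeated-edge cycle detection by the number-theoretic fact that the (position,direction) state has period 2*lcm(rows,columns), so it writes m+1 along that closed-form path up to the fill point or the period, with no visited set, no cycle check and no rescans; a timing run measured B 54x faster at n=16 and several hundred times faster at n=64.
import Mathlib
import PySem

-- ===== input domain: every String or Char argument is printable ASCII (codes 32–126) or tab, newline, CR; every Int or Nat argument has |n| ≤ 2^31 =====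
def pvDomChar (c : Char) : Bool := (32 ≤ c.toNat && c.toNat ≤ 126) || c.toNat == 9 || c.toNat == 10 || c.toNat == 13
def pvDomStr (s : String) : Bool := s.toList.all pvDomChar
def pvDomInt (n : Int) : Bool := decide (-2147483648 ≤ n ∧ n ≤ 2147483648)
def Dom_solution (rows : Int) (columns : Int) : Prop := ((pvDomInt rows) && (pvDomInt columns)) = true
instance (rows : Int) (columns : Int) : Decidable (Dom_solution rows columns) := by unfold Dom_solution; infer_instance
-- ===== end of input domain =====

-- B replaces A's stateful walk (per-step grid rescan for zeros, growing visited-edge list with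
-- cycle detection) by a closed-form reconstruction: the position after m moves is
-- ((m//2) % rows, ((m+1)//2) % columns) and the walk's (position, direction) state has period
-- 2*lcm(rows, columns), which is exactly when A's repeated-edge break fires.


-- ===== PORT A =====
-- g[i][j] = v  (both Pythons assign only at indices that are in range at every call site inside
-- Pre_, so the total forms pyGetD/pySetD are exact there)
def pvSet2 (g : List (List Int)) (i : Int) (j : Int) (v : Int) : List (List Int) :=
  PySem.List.pySetD g i (PySem.List.pySetD (PySem.List.pyGetD g i []) j v)

-- zCnt = 0; for i in answer: zCnt += i.count(0)
def pvZ (answer : List (List Int)) : Int :=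
  answer.foldl (fun zCnt i => zCnt + (PySem.List.count i 0 : Int)) 0

-- Fuel for the 'while True' loop (totality guard only). Each non-final iteration appends a fresh
-- edge drawn from the ≤ 2·rows·columns possible (position, direction) states, so the loop runs at
-- most 2·rows·columns + 2 iterations and this fuel is never exhausted for the Python.
def pvFuel (rows : Int) (columns : Int) : Nat := (2 * rows * columns + 4).toNat

def pvLoopA (rows : Int) (columns : Int) :
    Nat → List (List Int) → Int → Int → Int → List (List Int) → List (List Int)
  | 0, answer, _, _, _, _ => answer    -- fuel exhausted: unreachable for the Python
  | Nat.succ fuel, answer, now, r, c, visited =>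
    if pvZ answer = 0 then answer
    else if PySem.Int.mod now 2 = 1 then
      let prevR := r
      let prevC := c
      let c1 := c + 1
      let c' := if c1 = columns then 0 else c1
      if [prevR, prevC, r, c'] ∈ visited then
        pvSet2 answer prevR prevC (now - (visited.length : Int))
      else
        pvLoopA rows columns fuel (pvSet2 answer r c' (now + 1)) (now + 1) r c'
          (visited ++ [[prevR, prevC, r, c']])
    else
      let prevR := r
      let prevC := c
      let r1 := r + 1
      let r' := if r1 = rows then 0 else r1
      if [prevR, prevC, r', c] ∈ visited then
        pvSet2 answer prevR prevC (now - (visited.length : Int))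
      else
        pvLoopA rows columns fuel (pvSet2 answer r' c (now + 1)) (now + 1) r' c
          (visited ++ [[prevR, prevC, r', c]])

def solution (rows : Int) (columns : Int) : List (List Int) :=
  let answer := (PySem.List.pyRange 0 rows 1).map
    (fun _ => (PySem.List.pyRange 0 columns 1).map (fun _ => (0 : Int)))
  let answer := pvSet2 answer 0 0 1
  pvLoopA rows columns (pvFuel rows columns) answer 1 0 0 []

-- ===== PORT B =====
-- pos(m) = ((m // 2) % rows, ((m + 1) // 2) % columns)
def pvPos (rows : Int) (columns : Int) (m : Int) : Int × Int :=
  (PySem.Int.mod (PySem.Int.floordiv m 2) rows,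
   PySem.Int.mod (PySem.Int.floordiv (m + 1) 2) columns)

-- for m in range(period): seen.add(pos(m)); if len(seen) == rows*columns: last = m; break
def pvFindLast (rows : Int) (columns : Int) :
    List Int → PySem.Set (Int × Int) → Int → Int
  | [], _, dflt => dflt
  | m :: ms, seen, dflt =>
    let seen' := PySem.Set.add seen (pvPos rows columns m)
    if PySem.Set.len seen' = rows * columns then m
    else pvFindLast rows columns ms seen' dflt

def solution_alt (rows : Int) (columns : Int) : List (List Int) :=
  let period := PySem.Int.floordiv (2 * rows * columns) (Int.gcd rows columns)
  let last := pvFindLast rows columns (PySem.List.pyRange 0 period 1) PySem.Set.empty (period - 1)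
  (PySem.List.pyRange 0 (last + 1) 1).foldl
    (fun g m => pvSet2 g (pvPos rows columns m).1 (pvPos rows columns m).2 (m + 1))
    ((PySem.List.pyRange 0 rows 1).map (fun _ => List.replicate columns.toNat (0 : Int)))

-- ===== PRECONDITION & SPEC =====
-- A raises IndexError (at answer[0][0] = 1) exactly when rows < 1 or columns < 1.
def Pre_solution (rows : Int) (columns : Int) : Prop := 1 ≤ rows ∧ 1 ≤ columns
instance (rows : Int) (columns : Int) : Decidable (Pre_solution rows columns) := by
  unfold Pre_solution; infer_instance
def pvWitness_solution : Int × Int := (2, 3)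

def Spec_solution (rows : Int) (columns : Int) (out : List (List Int)) : Prop :=
  out = solution_alt rows columns
instance (rows : Int) (columns : Int) (out : List (List Int)) : Decidable (Spec_solution rows columns out) := by
  unfold Spec_solution; infer_instance

-- ===== CLAIM (what is proved, stated in full; the proofs are below) =====
def Claim_equal_solution : Prop := ∀ (rows : Int) (columns : Int), Dom_solution rows columns →
  Pre_solution rows columns → Spec_solution rows columns (solution rows columns)

-- ===== LEMMAS AND PROOFS =====

-- abbreviations used only by the proofs
def pvZeros (rows columns : Int) : List (List Int) :=
  (PySem.List.pyRange 0 rows 1).map (fun _ => List.replicate columns.toNat (0 : Int))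

def pvWrite (rows columns : Int) (g : List (List Int)) (m : Int) : List (List Int) :=
  pvSet2 g (pvPos rows columns m).1 (pvPos rows columns m).2 (m + 1)

-- grid after the writes for moves 0..n
def pvG (rows columns n : Int) : List (List Int) :=
  (PySem.List.pyRange 0 (n + 1) 1).foldl (pvWrite rows columns) (pvZeros rows columns)

-- cells covered by moves 0..n
def pvCov (rows columns n : Int) : PySem.Set (Int × Int) :=
  PySem.Set.ofList ((PySem.List.pyRange 0 (n + 1) 1).map (pvPos rows columns))

def pvFull (rows columns n : Int) : Prop :=
  PySem.Set.len (pvCov rows columns n) = rows * columns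

-- the edge appended by move k (A's [prev_r, prev_c, r, c])
def pvE (rows columns k : Int) : List Int :=
  [(pvPos rows columns (k - 1)).1, (pvPos rows columns (k - 1)).2,
   (pvPos rows columns k).1, (pvPos rows columns k).2]

def pvEdges (rows columns n : Int) : List (List Int) :=
  (PySem.List.pyRange 1 (n + 1) 1).map (pvE rows columns)

def pvT (rows columns : Int) : Int := 2 * (Int.lcm rows columns : Int)

def pvCell (g : List (List Int)) (i j : Int) : Int :=
  PySem.List.pyGetD (PySem.List.pyGetD g i []) j 0

def pvShape (rows columns : Int) (g : List (List Int)) : Prop :=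
  g.length = rows.toNat ∧ ∀ row ∈ g, row.length = columns.toNat


-- ---------- arithmetic on positions ----------

lemma pvPos_eq (rows columns m : Int) (hR : 0 < rows) (hC : 0 < columns) :
    pvPos rows columns m = (m / 2 % rows, (m + 1) / 2 % columns) := by
  simp [pvPos, PySem.Int.mod_eq_emod_of_pos hR, PySem.Int.mod_eq_emod_of_pos hC]

lemma pvPos_bounds (rows columns m : Int) (hR : 0 < rows) (hC : 0 < columns) :
    0 ≤ (pvPos rows columns m).1 ∧ (pvPos rows columns m).1 < rows ∧
    0 ≤ (pvPos rows columns m).2 ∧ (pvPos rows columns m).2 < columns := by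
  rw [pvPos_eq rows columns m hR hC]
  exact ⟨Int.emod_nonneg _ (by omega), Int.emod_lt_of_pos _ hR,
    Int.emod_nonneg _ (by omega), Int.emod_lt_of_pos _ hC⟩

lemma pvPos_zero (rows columns : Int) (hR : 0 < rows) (hC : 0 < columns) :
    pvPos rows columns 0 = (0, 0) := by
  rw [pvPos_eq rows columns 0 hR hC]; norm_num

lemma pvPos_succ_even (rows columns n : Int) (hR : 0 < rows) (hC : 0 < columns)
    (he : n % 2 = 0) :
    pvPos rows columns (n + 1)
      = ((pvPos rows columns n).1, ((pvPos rows columns n).2 + 1) % columns) := by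
  rw [pvPos_eq rows columns n hR hC, pvPos_eq rows columns (n+1) hR hC]
  have h1 : (n + 1) / 2 = n / 2 := by omega
  have h2 : (n + 1 + 1) / 2 = (n + 1) / 2 + 1 := by omega
  rw [h1, h2, h1]
  exact Prod.ext rfl (by rw [Int.emod_add_emod])

lemma pvPos_succ_odd (rows columns n : Int) (hR : 0 < rows) (hC : 0 < columns)
    (ho : n % 2 = 1) :
    pvPos rows columns (n + 1)
      = (((pvPos rows columns n).1 + 1) % rows, (pvPos rows columns n).2) := by
  rw [pvPos_eq rows columns n hR hC, pvPos_eq rows columns (n+1) hR hC]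
  have h1 : (n + 1) / 2 = n / 2 + 1 := by omega
  have h2 : (n + 1 + 1) / 2 = (n + 1) / 2 := by omega
  rw [h2, h1]
  exact Prod.ext (by rw [Int.emod_add_emod]) rfl

lemma pvPos_period (rows columns m : Int) (hR : 0 < rows) (hC : 0 < columns) :
    pvPos rows columns (m + pvT rows columns) = pvPos rows columns m := by
  obtain ⟨t, ht⟩ := Int.dvd_lcm_left rows columns
  obtain ⟨u, hu⟩ := Int.dvd_lcm_right rows columns
  rw [pvPos_eq rows columns _ hR hC, pvPos_eq rows columns m hR hC, pvT]
  have h1 : (m + 2 * (Int.lcm rows columns : Int)) / 2 = m / 2 + (Int.lcm rows columns : Int) := by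
    omega
  have h2 : (m + 2 * (Int.lcm rows columns : Int) + 1) / 2
      = (m + 1) / 2 + (Int.lcm rows columns : Int) := by omega
  rw [h1, h2]
  refine Prod.ext ?_ ?_
  · show (m / 2 + (Int.lcm rows columns : Int)) % rows = m / 2 % rows
    rw [ht, Int.add_mul_emod_self_left]
  · show ((m + 1) / 2 + (Int.lcm rows columns : Int)) % columns = (m + 1) / 2 % columns
    rw [hu, Int.add_mul_emod_self_left]

lemma pv_wrapmod (x m : Int) (h0 : 0 ≤ x) (hm : x < m) :
    (x + 1) % m = if x + 1 = m then 0 else x + 1 := by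
  split_ifs with h
  · simp [h]
  · exact Int.emod_eq_of_lt (by omega) (by omega)

lemma pv_parity_now (n : Int) : (PySem.Int.mod (n + 1) 2 = 1) ↔ n % 2 = 0 := by
  rw [PySem.Int.mod_eq_emod_of_pos (by norm_num : (0:Int) < 2)]
  omega

lemma pv_dvd_of_emod_eq {a b n : Int} (h : a % n = b % n) : n ∣ (b - a) := by
  have h2 : (b - a) % n = 0 := Int.emod_eq_emod_iff_emod_sub_eq_zero.mp h.symm
  exact Int.dvd_of_emod_eq_zero h2

lemma pvLcm_pos (rows columns : Int) (hR : 1 ≤ rows) (hC : 1 ≤ columns) :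
    0 < (Int.lcm rows columns : Int) := by
  have h := Int.gcd_mul_lcm rows columns
  have h2 : 0 < rows.natAbs * columns.natAbs :=
    Nat.mul_pos (by omega) (by omega)
  have h3 : 0 < Int.lcm rows columns := by
    rcases Nat.eq_zero_or_pos (Int.lcm rows columns) with h0 | h0
    · rw [h0, Nat.mul_zero] at h; omega
    · exact h0
  exact_mod_cast h3

lemma pvRC_cast (rows columns : Int) (hR : 1 ≤ rows) (hC : 1 ≤ columns) :
    ((rows.natAbs * columns.natAbs : Nat) : Int) = rows * columns := by
  push_cast
  rw [abs_of_nonneg (by omega : (0:Int) ≤ rows), abs_of_nonneg (by omega : (0:Int) ≤ columns)]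

lemma pvGcdLcm (rows columns : Int) (hR : 1 ≤ rows) (hC : 1 ≤ columns) :
    (Int.gcd rows columns : Int) * (Int.lcm rows columns : Int) = rows * columns := by
  rw [← pvRC_cast rows columns hR hC]
  exact_mod_cast congrArg (Nat.cast : Nat → Int) (Int.gcd_mul_lcm rows columns)

lemma pvT_bounds (rows columns : Int) (hR : 1 ≤ rows) (hC : 1 ≤ columns) :
    2 ≤ pvT rows columns ∧ pvT rows columns ≤ 2 * rows * columns := by
  have hpos := pvLcm_pos rows columns hR hC
  have hg : 1 ≤ (Int.gcd rows columns : Int) := by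
    have := Int.gcd_pos_of_ne_zero_left columns (a := rows) (by omega)
    omega
  have h' := pvGcdLcm rows columns hR hC
  constructor
  · unfold pvT; omega
  · unfold pvT; nlinarith

lemma pvPeriod_eq (rows columns : Int) (hR : 1 ≤ rows) (hC : 1 ≤ columns) :
    PySem.Int.floordiv (2 * rows * columns) (Int.gcd rows columns) = pvT rows columns := by
  have hg : 0 < (Int.gcd rows columns : Int) := by
    have := Int.gcd_pos_of_ne_zero_left columns (a := rows) (by omega)
    omega
  have h' := pvGcdLcm rows columns hR hC
  rw [PySem.Int.floordiv_eq_ediv_of_pos hg]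
  have h2 : 2 * rows * columns = pvT rows columns * (Int.gcd rows columns : Int) := by
    unfold pvT; nlinarith
  rw [h2, Int.mul_ediv_cancel _ (by omega)]

-- ---------- structural step lemmas ----------

lemma pvG_succ (rows columns n : Int) (hn : 0 ≤ n) :
    pvG rows columns (n + 1) = pvWrite rows columns (pvG rows columns n) (n + 1) := by
  unfold pvG
  rw [PySem.List.pyRange_one_succ_right (by omega : (0:Int) ≤ n + 1), List.foldl_append]
  rfl

lemma pvCov_succ (rows columns n : Int) (hn : 0 ≤ n) :
    pvCov rows columns n
      = PySem.Set.add (pvCov rows columns (n - 1)) (pvPos rows columns n) := by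
  unfold pvCov
  rw [show n - 1 + 1 = n by ring]
  rw [PySem.List.pyRange_one_succ_right (by omega : (0:Int) ≤ n), List.map_append,
    PySem.Set.ofList_eq_foldl, PySem.Set.ofList_eq_foldl, List.foldl_append]
  rfl

lemma pvEdges_succ (rows columns n : Int) (_hn : 0 ≤ n) :
    pvEdges rows columns (n + 1) = pvEdges rows columns n ++ [pvE rows columns (n + 1)] := by
  unfold pvEdges
  rw [PySem.List.pyRange_one_succ_right (by omega : (1:Int) ≤ n + 1), List.map_append]
  rfl

lemma pvCov_mem (rows columns n : Int) (x : Int × Int) (_hn : 0 ≤ n) :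
    x ∈ pvCov rows columns n ↔ ∃ m, 0 ≤ m ∧ m ≤ n ∧ pvPos rows columns m = x := by
  unfold pvCov
  rw [PySem.Set.mem_ofList]
  simp only [List.mem_map, PySem.List.mem_pyRange_one]
  constructor
  · rintro ⟨m, ⟨h1, h2⟩, h3⟩; exact ⟨m, h1, by omega, h3⟩
  · rintro ⟨m, h1, h2, h3⟩; exact ⟨m, ⟨h1, by omega⟩, h3⟩

lemma pvEdges_mem (rows columns n : Int) (e : List Int) :
    e ∈ pvEdges rows columns n ↔ ∃ k, 1 ≤ k ∧ k ≤ n ∧ pvE rows columns k = e := by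
  unfold pvEdges
  simp only [List.mem_map, PySem.List.mem_pyRange_one]
  constructor
  · rintro ⟨k, ⟨h1, h2⟩, h3⟩; exact ⟨k, h1, by omega, h3⟩
  · rintro ⟨k, h1, h2, h3⟩; exact ⟨k, ⟨h1, by omega⟩, h3⟩

lemma pvEdges_length (rows columns n : Int) (hn : 0 ≤ n) :
    ((pvEdges rows columns n).length : Int) = n := by
  unfold pvEdges
  rw [List.length_map, PySem.List.length_pyRange_one]
  omega

lemma pvLen_add (s : PySem.Set (Int × Int)) (x : Int × Int) :
    PySem.Set.len (PySem.Set.add s x)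
      = PySem.Set.len s + (if x ∈ s then 0 else 1) := by
  by_cases h : x ∈ s
  · simp [PySem.Set.add, PySem.Set.len, h]
  · simp [PySem.Set.add, PySem.Set.len, h]

-- all cells of the grid, as a nodup list of length rows*columns
lemma pvCells_facts (rows columns : Int) (hR : 1 ≤ rows) (hC : 1 ≤ columns) :
    ((PySem.List.pyRange 0 rows 1) ×ˢ (PySem.List.pyRange 0 columns 1)).Nodup ∧
    ((((PySem.List.pyRange 0 rows 1) ×ˢ (PySem.List.pyRange 0 columns 1)).length : Nat) : Int)
      = rows * columns := by
  constructor
  · exact List.Nodup.product (PySem.List.nodup_pyRange_one 0 rows)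
      (PySem.List.nodup_pyRange_one 0 columns)
  · rw [List.length_product, PySem.List.length_pyRange_one, PySem.List.length_pyRange_one]
    have h1 : (((rows - 0).toNat : Nat) : Int) = rows := by omega
    have h2 : (((columns - 0).toNat : Nat) : Int) = columns := by omega
    push_cast at h1 h2 ⊢
    rw [h1, h2]

lemma pvCov_le (rows columns n : Int) (hR : 1 ≤ rows) (hC : 1 ≤ columns) (hn : 0 ≤ n) :
    PySem.Set.len (pvCov rows columns n) ≤ rows * columns := by
  obtain ⟨hnd, hlen⟩ := pvCells_facts rows columns hR hC
  have hsub : pvCov rows columns n ⊆ (PySem.List.pyRange 0 rows 1) ×ˢ (PySem.List.pyRange 0 columns 1) := by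
    intro x hx
    obtain ⟨m, -, -, rfl⟩ := (pvCov_mem rows columns n x hn).mp hx
    obtain ⟨b1, b2, b3, b4⟩ := pvPos_bounds rows columns m (by omega) (by omega)
    have : (pvPos rows columns m).1 ∈ PySem.List.pyRange 0 rows 1 :=
      (PySem.List.mem_pyRange_one).mpr ⟨b1, b2⟩
    have h2 : (pvPos rows columns m).2 ∈ PySem.List.pyRange 0 columns 1 :=
      (PySem.List.mem_pyRange_one).mpr ⟨b3, b4⟩
    rw [show pvPos rows columns m = ((pvPos rows columns m).1, (pvPos rows columns m).2) from rfl]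
    exact List.mem_product.mpr ⟨this, h2⟩
  have hnd2 : (pvCov rows columns n).Nodup := by
    unfold pvCov; exact PySem.Set.nodup_ofList _
  have hle := (List.subperm_of_subset hnd2 hsub).length_le
  have hl2 : PySem.Set.len (pvCov rows columns n) = ((pvCov rows columns n).length : Int) := by
    simp [PySem.Set.len]
  omega

lemma pvCov_len_mono (rows columns m n : Int) (h0 : 0 ≤ m) (hmn : m ≤ n) :
    PySem.Set.len (pvCov rows columns m) ≤ PySem.Set.len (pvCov rows columns n) := by
  obtain ⟨d, rfl⟩ : ∃ d : Nat, n = m + d := ⟨(n - m).toNat, by omega⟩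
  induction d with
  | zero => simp
  | succ d ih =>
    have step : pvCov rows columns (m + (d+1 : Nat))
        = PySem.Set.add (pvCov rows columns (m + (d+1 : Nat) - 1))
            (pvPos rows columns (m + (d+1 : Nat))) :=
      pvCov_succ rows columns _ (by push_cast; omega)
    have he : m + ((d:Int) + 1) - 1 = m + (d : Int) := by ring
    have := ih (by omega)
    rw [step, pvLen_add]
    push_cast at he ⊢
    rw [he]
    split_ifs <;> omega

lemma pvFull_mono (rows columns m n : Int) (hR : 1 ≤ rows) (hC : 1 ≤ columns)
    (h0 : 0 ≤ m) (hmn : m ≤ n) (h : pvFull rows columns m) : pvFull rows columns n := by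
  have h1 := pvCov_len_mono rows columns m n h0 hmn
  have h2 := pvCov_le rows columns n hR hC (by omega)
  unfold pvFull at *
  omega

-- ---------- grid lemmas ----------

lemma pv_count_set (l : List Int) (j : Nat) (v : Int) (hj : j < l.length) :
    ((l.set j v).count 0 : Int)
      = (l.count 0 : Int) - (if l[j] = 0 then 1 else 0) + (if v = 0 then 1 else 0) := by
  induction l generalizing j with
  | nil => simp at hj
  | cons a t ih =>
    cases j with
    | zero => simp [List.count_cons]; split_ifs <;> simp_all
    | succ j =>
      rw [List.set_cons_succ, List.count_cons, List.count_cons, List.getElem_cons_succ]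
      push_cast
      rw [ih j (by simpa using hj)]
      split_ifs <;> ring

lemma pv_sum_set (l : List Int) (i : Nat) (x : Int) (hi : i < l.length) :
    (l.set i x).sum = l.sum - l[i] + x := by
  induction l generalizing i with
  | nil => simp at hi
  | cons a t ih =>
    cases i with
    | zero => simp; ring
    | succ i =>
      rw [List.set_cons_succ, List.sum_cons, List.sum_cons, List.getElem_cons_succ,
        ih i (by simpa using hi)]
      ring

lemma pvZ_eq_sum (g : List (List Int)) :
    pvZ g = (g.map (fun row => (List.count 0 row : Int))).sum := by
  unfold pvZ
  rw [PySem.List.foldl_add g (fun i => (PySem.List.count i 0 : Int)) 0]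
  simp [PySem.List.count_eq]

lemma pvCell_eq (g : List (List Int)) (i j : Int) (hi0 : 0 ≤ i) (hj0 : 0 ≤ j) :
    pvCell g i j = (g.getD i.toNat []).getD j.toNat 0 := by
  unfold pvCell
  rw [PySem.List.pyGetD_of_nonneg _ _ hi0, PySem.List.pyGetD_of_nonneg _ _ hj0]

lemma pvSet2_eq (g : List (List Int)) (i j v : Int) (hi0 : 0 ≤ i) (hj0 : 0 ≤ j) :
    pvSet2 g i j v = g.set i.toNat ((g.getD i.toNat []).set j.toNat v) := by
  unfold pvSet2
  rw [PySem.List.pySetD_of_nonneg _ _ hi0, PySem.List.pySetD_of_nonneg _ _ hj0,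
    PySem.List.pyGetD_of_nonneg _ _ hi0]

lemma pvCell_get (g : List (List Int)) (i j : Int) (hi0 : 0 ≤ i) (hj0 : 0 ≤ j)
    (h1 : i.toNat < g.length) (h2 : j.toNat < (g[i.toNat]'h1).length) :
    pvCell g i j = (g[i.toNat]'h1)[j.toNat]'h2 := by
  rw [pvCell_eq g i j hi0 hj0, List.getD_eq_getElem _ _ h1, List.getD_eq_getElem _ _ h2]

lemma pvShape_zeros (rows columns : Int) :
    pvShape rows columns (pvZeros rows columns) := by
  constructor
  · simp [pvZeros, PySem.List.length_pyRange_one]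
  · intro row hrow
    simp [pvZeros] at hrow
    obtain ⟨-, rfl⟩ := hrow
    simp

lemma pvZ_zeros (rows columns : Int) (hR : 0 ≤ rows) (hC : 0 ≤ columns) :
    pvZ (pvZeros rows columns) = rows * columns := by
  rw [pvZ_eq_sum]
  unfold pvZeros
  rw [List.map_map]
  rw [List.map_congr_left (g := fun _ => (columns.toNat : Int))
    (fun x _ => by simp)]
  rw [List.map_const', List.sum_replicate, PySem.List.length_pyRange_one, nsmul_eq_mul]
  rw [show (((rows - 0).toNat : Nat) : Int) = rows by omega,
    show ((columns.toNat : Nat) : Int) = columns by omega]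

lemma pvCell_zeros (rows columns i j : Int) (hi0 : 0 ≤ i) (hi : i < rows)
    (hj0 : 0 ≤ j) (hj : j < columns) :
    pvCell (pvZeros rows columns) i j = 0 := by
  have hlen : i.toNat < (pvZeros rows columns).length := by
    have := (pvShape_zeros rows columns).1
    omega
  rw [pvCell_eq _ i j hi0 hj0, List.getD_eq_getElem _ _ hlen]
  have hrow : (pvZeros rows columns)[i.toNat] = List.replicate columns.toNat (0 : Int) := by
    simp [pvZeros]
  rw [hrow]
  rw [List.getD_eq_getElem _ _ (by simp; omega : j.toNat < (List.replicate columns.toNat (0:Int)).length)]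
  simp

lemma pvShape_set2 (rows columns : Int) (g : List (List Int)) (i j v : Int)
    (hg : pvShape rows columns g) (hi0 : 0 ≤ i) (hi : i < rows) (hj0 : 0 ≤ j) :
    pvShape rows columns (pvSet2 g i j v) := by
  obtain ⟨hlen, hrows⟩ := hg
  have hit : i.toNat < g.length := by omega
  rw [pvSet2_eq g i j v hi0 hj0]
  constructor
  · rw [List.length_set]; exact hlen
  · intro row hrow
    rcases List.mem_or_eq_of_mem_set hrow with h | h
    · exact hrows row h
    · rw [h, List.length_set, List.getD_eq_getElem _ _ hit]
      exact hrows _ (List.getElem_mem hit)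

lemma pvCell_set2 (rows columns : Int) (g : List (List Int)) (i j v i' j' : Int)
    (hg : pvShape rows columns g)
    (hi0 : 0 ≤ i) (hi : i < rows) (hj0 : 0 ≤ j) (hj : j < columns)
    (hi'0 : 0 ≤ i') (hi' : i' < rows) (hj'0 : 0 ≤ j') (hj' : j' < columns) :
    pvCell (pvSet2 g i j v) i' j' = if i = i' ∧ j = j' then v else pvCell g i' j' := by
  obtain ⟨hlen, hrows⟩ := hg
  have hit : i.toNat < g.length := by omega
  have hit' : i'.toNat < g.length := by omega
  have hb1 : i'.toNat < (g.set i.toNat ((g.getD i.toNat []).set j.toNat v)).length := by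
    rw [List.length_set]; exact hit'
  rw [pvSet2_eq g i j v hi0 hj0, pvCell_eq _ i' j' hi'0 hj'0,
    List.getD_eq_getElem _ _ hb1, List.getElem_set]
  by_cases hii : i.toNat = i'.toNat
  · rw [if_pos hii]
    have hieq : i = i' := by omega
    have hrl : (g[i.toNat]'hit).length = columns.toNat := hrows _ (List.getElem_mem hit)
    have hb2 : j'.toNat < ((g[i.toNat]'hit).set j.toNat v).length := by
      rw [List.length_set, hrl]; omega
    rw [List.getD_eq_getElem _ _ hit, List.getD_eq_getElem _ _ hb2, List.getElem_set]
    by_cases hjj : j.toNat = j'.toNat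
    · have hjeq : j = j' := by omega
      rw [if_pos hjj, if_pos ⟨hieq, hjeq⟩]
    · have hjne : ¬ (i = i' ∧ j = j') := by
        rintro ⟨-, h⟩; omega
      rw [if_neg hjj, if_neg hjne, pvCell_eq _ i' j' hi'0 hj'0,
        List.getD_eq_getElem _ _ hit']
      have hrl' : j'.toNat < (g[i'.toNat]'hit').length := by
        rw [hrows _ (List.getElem_mem hit')]; omega
      rw [List.getD_eq_getElem _ _ hrl']
      simp only [hii]
  · have hine : ¬ (i = i' ∧ j = j') := by rintro ⟨h, -⟩; omega
    rw [if_neg hii, if_neg hine, pvCell_eq _ i' j' hi'0 hj'0,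
      List.getD_eq_getElem _ _ hit']

lemma pvZ_set2 (rows columns : Int) (g : List (List Int)) (i j v : Int)
    (hg : pvShape rows columns g)
    (hi0 : 0 ≤ i) (hi : i < rows) (hj0 : 0 ≤ j) (hj : j < columns) :
    pvZ (pvSet2 g i j v)
      = pvZ g - (if pvCell g i j = 0 then 1 else 0) + (if v = 0 then 1 else 0) := by
  obtain ⟨hlen, hrows⟩ := hg
  have hit : i.toNat < g.length := by omega
  have hjt : j.toNat < (g[i.toNat]'hit).length := by
    rw [hrows _ (List.getElem_mem hit)]; omega
  rw [pvSet2_eq g i j v hi0 hj0, List.getD_eq_getElem _ _ hit,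
    pvZ_eq_sum, pvZ_eq_sum, List.map_set,
    pv_sum_set _ _ _ (by simpa using hit), List.getElem_map,
    pv_count_set _ _ _ hjt, pvCell_get g i j hi0 hj0 hit hjt]
  ring

lemma pvSet2_set2 (rows columns : Int) (g : List (List Int)) (i j v w : Int)
    (hg : pvShape rows columns g)
    (hi0 : 0 ≤ i) (hi : i < rows) (hj0 : 0 ≤ j) :
    pvSet2 (pvSet2 g i j v) i j w = pvSet2 g i j w := by
  obtain ⟨hlen, hrows⟩ := hg
  have hit : i.toNat < g.length := by omega
  rw [pvSet2_eq g i j v hi0 hj0, pvSet2_eq _ i j w hi0 hj0, pvSet2_eq g i j w hi0 hj0,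
    List.set_set]
  congr 1
  rw [List.getD_eq_getElem _ _ (by rw [List.length_set]; exact hit),
    List.getElem_set_self, List.set_set]

lemma pvSet2_self (rows columns : Int) (g : List (List Int)) (i j : Int)
    (hg : pvShape rows columns g)
    (hi0 : 0 ≤ i) (hi : i < rows) (hj0 : 0 ≤ j) (hj : j < columns) :
    pvSet2 g i j (pvCell g i j) = g := by
  obtain ⟨hlen, hrows⟩ := hg
  have hit : i.toNat < g.length := by omega
  have hjt : j.toNat < (g[i.toNat]'hit).length := by
    rw [hrows _ (List.getElem_mem hit)]; omega
  rw [pvSet2_eq g i j _ hi0 hj0, pvCell_get g i j hi0 hj0 hit hjt,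
    List.getD_eq_getElem _ _ hit, List.set_getElem_self, List.set_getElem_self]

-- ---------- the grid invariant ----------

lemma pvG_zero (rows columns : Int) (hR : 1 ≤ rows) (hC : 1 ≤ columns) :
    pvG rows columns 0 = pvSet2 (pvZeros rows columns) 0 0 1 := by
  unfold pvG
  rw [PySem.List.pyRange_one_cons (by norm_num : (0:Int) < 0 + 1),
    PySem.List.pyRange_one_eq_nil (by norm_num : (0:Int) + 1 ≤ 0 + 1)]
  simp [pvWrite, pvPos_zero rows columns (by omega) (by omega)]

lemma pvCov_zero (rows columns : Int) (hR : 1 ≤ rows) (hC : 1 ≤ columns) :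
    pvCov rows columns 0 = [(0, 0)] := by
  unfold pvCov
  rw [PySem.List.pyRange_one_cons (by norm_num : (0:Int) < 0 + 1),
    PySem.List.pyRange_one_eq_nil (by norm_num : (0:Int) + 1 ≤ 0 + 1)]
  simp [pvPos_zero rows columns (by omega) (by omega), PySem.Set.ofList]

lemma pvG_inv (rows columns : Int) (hR : 1 ≤ rows) (hC : 1 ≤ columns) :
    ∀ n : Int, 0 ≤ n →
      pvShape rows columns (pvG rows columns n) ∧
      pvZ (pvG rows columns n) = rows * columns - PySem.Set.len (pvCov rows columns n) ∧
      (∀ i j, 0 ≤ i → i < rows → 0 ≤ j → j < columns →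
        (pvCell (pvG rows columns n) i j = 0 ↔ ¬ (i, j) ∈ pvCov rows columns n)) := by
  intro n hn
  induction n, hn using Int.le_induction with
  | base =>
    rw [pvG_zero rows columns hR hC, pvCov_zero rows columns hR hC]
    have hsz := pvShape_zeros rows columns
    refine ⟨pvShape_set2 rows columns _ 0 0 1 hsz le_rfl (by omega) le_rfl, ?_, ?_⟩
    · rw [pvZ_set2 rows columns _ 0 0 1 hsz le_rfl (by omega) le_rfl (by omega),
        pvCell_zeros rows columns 0 0 le_rfl (by omega) le_rfl (by omega),
        pvZ_zeros rows columns (by omega) (by omega)]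
      simp [PySem.Set.len]
    · intro i j hi0 hi hj0 hj
      rw [pvCell_set2 rows columns _ 0 0 1 i j hsz le_rfl (by omega) le_rfl (by omega)
        hi0 hi hj0 hj]
      by_cases h : (0:Int) = i ∧ (0:Int) = j
      · obtain ⟨rfl, rfl⟩ : i = 0 ∧ j = 0 := ⟨h.1.symm, h.2.symm⟩
        simp
      · rw [if_neg h, pvCell_zeros rows columns i j hi0 hi hj0 hj]
        have hne : ¬ ((i, j) ∈ ([((0:Int), (0:Int))] : List (Int × Int))) := by
          simp only [List.mem_singleton]
          intro hmem
          injection hmem with h1 h2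
          exact h ⟨h1.symm, h2.symm⟩
        simp [hne]
  | succ n hn ih =>
    obtain ⟨ihS, ihZ, ihC⟩ := ih
    obtain ⟨b1, b2, b3, b4⟩ := pvPos_bounds rows columns (n+1) (by omega) (by omega)
    have hcov : pvCov rows columns (n+1)
        = PySem.Set.add (pvCov rows columns n) (pvPos rows columns (n+1)) := by
      rw [pvCov_succ rows columns (n+1) (by omega), show n + 1 - 1 = n by ring]
    rw [pvG_succ rows columns n hn]
    unfold pvWrite
    refine ⟨pvShape_set2 rows columns _ _ _ _ ihS b1 b2 b3, ?_, ?_⟩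
    · rw [pvZ_set2 rows columns _ _ _ _ ihS b1 b2 b3 b4, hcov, pvLen_add, ihZ]
      have hc := ihC (pvPos rows columns (n+1)).1 (pvPos rows columns (n+1)).2 b1 b2 b3 b4
      rw [show ((pvPos rows columns (n+1)).1, (pvPos rows columns (n+1)).2)
          = pvPos rows columns (n+1) from rfl] at hc
      by_cases hmem : pvPos rows columns (n+1) ∈ pvCov rows columns n
      · rw [if_pos hmem, if_neg (fun h => (hc.mp h) hmem), if_neg (by omega : ¬ (n + 1 + 1 = 0))]
        ring
      · rw [if_neg hmem, if_pos (hc.mpr hmem), if_neg (by omega : ¬ (n + 1 + 1 = 0))]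
        ring
    · intro i j hi0 hi hj0 hj
      rw [pvCell_set2 rows columns _ _ _ _ i j ihS b1 b2 b3 b4 hi0 hi hj0 hj, hcov,
        PySem.Set.mem_add]
      by_cases h : (pvPos rows columns (n+1)).1 = i ∧ (pvPos rows columns (n+1)).2 = j
      · rw [if_pos h]
        have : (i, j) = pvPos rows columns (n+1) := by
          rw [← h.1, ← h.2]
        constructor
        · intro hv; omega
        · intro hno; exact absurd (Or.inr this) hno
      · rw [if_neg h, ihC i j hi0 hi hj0 hj]
        have hne : (i, j) ≠ pvPos rows columns (n+1) := by
          intro he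
          exact h ⟨by rw [← he], by rw [← he]⟩
        constructor
        · intro hni hor
          rcases hor with hmem | heq
          · exact hni hmem
          · exact hne heq
        · intro hno hmem
          exact hno (Or.inl hmem)

-- ---------- number theory: no early repeat, the closing edge, the (0,0) cell ----------

lemma pv_lcm_dvd (rows columns d : Int) (hd : 0 < d)
    (h1 : rows ∣ d) (h2 : columns ∣ d) : (Int.lcm rows columns : Int) ∣ d := by
  have hdt : ((d.toNat : Nat) : Int) = d := by omega
  rw [← hdt] at h1 h2 ⊢
  exact_mod_cast Int.lcm_dvd h1 h2

lemma pv_norepeat (rows columns k k' : Int) (hR : 1 ≤ rows) (hC : 1 ≤ columns)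
    (_hk1 : 1 ≤ k) (hkk : k < k') (hd : k' - k < pvT rows columns)
    (hnotriv : ¬ (rows = 1 ∧ columns = 1))
    (hE : pvE rows columns k = pvE rows columns k') : False := by
  have hR' : (0:Int) < rows := by omega
  have hC' : (0:Int) < columns := by omega
  unfold pvE at hE
  rw [pvPos_eq rows columns (k-1) hR' hC', pvPos_eq rows columns k hR' hC',
    pvPos_eq rows columns (k'-1) hR' hC', pvPos_eq rows columns k' hR' hC'] at hE
  simp only [List.cons.injEq, and_true] at hE
  obtain ⟨hA1, hA2, hA3, hA4⟩ := hE
  -- divisibilities of the four half-index differences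
  have d1 : rows ∣ ((k'-1)/2 - (k-1)/2) := pv_dvd_of_emod_eq hA1
  have d2 : columns ∣ ((k'-1+1)/2 - (k-1+1)/2) := pv_dvd_of_emod_eq hA2
  have d3 : rows ∣ (k'/2 - k/2) := pv_dvd_of_emod_eq hA3
  have d4 : columns ∣ ((k'+1)/2 - (k+1)/2) := pv_dvd_of_emod_eq hA4
  have hk1 : k - 1 + 1 = k := by ring
  have hk1' : k' - 1 + 1 = k' := by ring
  rw [hk1, hk1'] at d2
  by_cases hp : k % 2 = k' % 2
  · -- same direction: the state difference is a multiple of the full period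
    have h2eq : (k'+1)/2 - (k+1)/2 = k'/2 - k/2 := by omega
    rw [h2eq] at d4
    have hpos : 0 < k'/2 - k/2 := by omega
    have hlcm := pv_lcm_dvd rows columns (k'/2 - k/2) hpos d3 d4
    have hle := Int.le_of_dvd hpos hlcm
    have : k'/2 - k/2 < (Int.lcm rows columns : Int) := by
      unfold pvT at hd; omega
    omega
  · -- opposite directions can only coincide on a 1×1 grid
    have hcd : columns ∣ (((k'+1)/2 - (k+1)/2) - (k'/2 - k/2)) := dvd_sub d4 d2
    have habs : (((k'+1)/2 - (k+1)/2) - (k'/2 - k/2)) = 1 ∨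
        (((k'+1)/2 - (k+1)/2) - (k'/2 - k/2)) = -1 := by omega
    have hc1 : columns = 1 := by
      rcases habs with h | h
      · rw [h] at hcd
        have := Int.le_of_dvd (by norm_num) hcd
        omega
      · rw [h] at hcd
        have hcd' : columns ∣ (1:Int) := (dvd_neg).mp (h ▸ hcd)
        have := Int.le_of_dvd (by norm_num) hcd'
        omega
    have hrd : rows ∣ ((k'/2 - k/2) - ((k'-1)/2 - (k-1)/2)) := dvd_sub d3 d1
    have habr : ((k'/2 - k/2) - ((k'-1)/2 - (k-1)/2)) = 1 ∨
        ((k'/2 - k/2) - ((k'-1)/2 - (k-1)/2)) = -1 := by omega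
    have hr1 : rows = 1 := by
      rcases habr with h | h
      · rw [h] at hrd
        have := Int.le_of_dvd (by norm_num) hrd
        omega
      · rw [h] at hrd
        have hrd' : rows ∣ (1:Int) := (dvd_neg).mp (h ▸ hrd)
        have := Int.le_of_dvd (by norm_num) hrd'
        omega
    exact hnotriv ⟨hr1, hc1⟩

lemma pvE_period (rows columns k : Int) (hR : 1 ≤ rows) (hC : 1 ≤ columns) :
    pvE rows columns (k + pvT rows columns) = pvE rows columns k := by
  unfold pvE
  rw [show k + pvT rows columns - 1 = (k - 1) + pvT rows columns by ring,
    pvPos_period rows columns (k-1) (by omega) (by omega),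
    pvPos_period rows columns k (by omega) (by omega)]

lemma pvPos_T (rows columns : Int) (hR : 1 ≤ rows) (hC : 1 ≤ columns) :
    pvPos rows columns (pvT rows columns) = (0, 0) := by
  have h := pvPos_period rows columns 0 (by omega) (by omega)
  rw [zero_add] at h
  rw [h, pvPos_zero rows columns (by omega) (by omega)]

lemma pvCover (rows columns : Int) (hR : 1 ≤ rows) (hC : 1 ≤ columns)
    (hcop : Int.gcd rows columns = 1) :
    pvFull rows columns (pvT rows columns - 1) := by
  have hT := pvT_bounds rows columns hR hC
  have hlcm0 := pvGcdLcm rows columns hR hC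
  rw [hcop] at hlcm0
  push_cast at hlcm0
  rw [one_mul] at hlcm0
  have hcop' : Nat.Coprime rows.toNat columns.toNat := by
    have h2 : columns.natAbs = columns.toNat := by omega
    unfold Nat.Coprime
    rw [show rows.toNat = rows.natAbs by omega, ← h2]
    exact hcop
  have hRCpos : 0 < rows.toNat * columns.toNat := Nat.mul_pos (by omega) (by omega)
  have hcastRC : ((rows.toNat * columns.toNat : Nat) : Int) = rows * columns := by
    have e1 : ((rows.toNat : Nat) : Int) = rows := by omega
    have e2 : ((columns.toNat : Nat) : Int) = columns := by omega
    push_cast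
    rw [e1, e2]
  -- every cell is reached by an even move within one period (CRT)
  have hall : ∀ i j : Int, 0 ≤ i → i < rows → 0 ≤ j → j < columns →
      (i, j) ∈ pvCov rows columns (pvT rows columns - 1) := by
    intro i j hi0 hi hj0 hj
    obtain ⟨hk1, hk2⟩ := (Nat.chineseRemainder hcop' i.toNat j.toNat).2
    set k : Nat := (Nat.chineseRemainder hcop' i.toNat j.toNat : Nat) with hkdef
    set a : Nat := k % (rows.toNat * columns.toNat) with hadef
    have ha_lt : a < rows.toNat * columns.toNat := Nat.mod_lt _ hRCpos
    have haR : a % rows.toNat = i.toNat := by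
      have h2 : a % rows.toNat = k % rows.toNat :=
        Nat.mod_mod_of_dvd k (dvd_mul_right _ _)
      rw [h2, hk1]
      exact Nat.mod_eq_of_lt (by omega)
    have haC : a % columns.toNat = j.toNat := by
      have h2 : a % columns.toNat = k % columns.toNat :=
        Nat.mod_mod_of_dvd k (dvd_mul_left _ _)
      rw [h2, hk2]
      exact Nat.mod_eq_of_lt (by omega)
    rw [pvCov_mem rows columns _ _ (by omega)]
    refine ⟨2 * (a : Int), by omega, ?_, ?_⟩
    · have ha2 : (a : Int) < rows * columns := by omega
      unfold pvT
      omega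
    · rw [pvPos_eq rows columns _ (by omega) (by omega)]
      have h2a : (2 * (a:Int)) / 2 = (a : Int) := by omega
      have h2b : (2 * (a:Int) + 1) / 2 = (a : Int) := by omega
      rw [h2a, h2b]
      have hmodR : ((a % rows.toNat : Nat) : Int) = (a : Int) % rows := by
        push_cast
        congr 1
        omega
      have hmodC : ((a % columns.toNat : Nat) : Int) = (a : Int) % columns := by
        push_cast
        congr 1
        omega
      refine Prod.ext ?_ ?_
      · show (a : Int) % rows = i
        rw [← hmodR, haR]
        omega
      · show (a : Int) % columns = j
        rw [← hmodC, haC]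
        omega
  obtain ⟨hnd, hlenP⟩ := pvCells_facts rows columns hR hC
  have hsub : ((PySem.List.pyRange 0 rows 1) ×ˢ (PySem.List.pyRange 0 columns 1))
      ⊆ pvCov rows columns (pvT rows columns - 1) := by
    intro x hx
    obtain ⟨x1, x2⟩ := x
    obtain ⟨hx1, hx2⟩ := List.mem_product.mp hx
    rw [PySem.List.mem_pyRange_one] at hx1 hx2
    exact hall x1 x2 hx1.1 hx1.2 hx2.1 hx2.2
  have hge := (List.subperm_of_subset hnd hsub).length_le
  have hle := pvCov_le rows columns (pvT rows columns - 1) hR hC (by omega)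
  have hlen2 : PySem.Set.len (pvCov rows columns (pvT rows columns - 1))
      = ((pvCov rows columns (pvT rows columns - 1)).length : Int) := by
    simp [PySem.Set.len]
  unfold pvFull
  omega

lemma pvFull_zero_of_one_one (rows columns : Int) (h11 : rows = 1 ∧ columns = 1) :
    pvFull rows columns 0 := by
  obtain ⟨rfl, rfl⟩ := h11
  unfold pvFull
  rw [pvCov_zero 1 1 le_rfl le_rfl]
  rfl

lemma pv00 (rows columns m : Int) (hR : 1 ≤ rows) (hC : 1 ≤ columns)
    (h1 : 1 ≤ m) (h2 : m ≤ pvT rows columns - 1)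
    (hnofull : ¬ pvFull rows columns (pvT rows columns - 1))
    (hpos : pvPos rows columns m = (0, 0)) : False := by
  have hR' : (0:Int) < rows := by omega
  have hC' : (0:Int) < columns := by omega
  rw [pvPos_eq rows columns m hR' hC', Prod.mk.injEq] at hpos
  obtain ⟨hr, hc⟩ := hpos
  have dr : rows ∣ m / 2 := Int.dvd_of_emod_eq_zero hr
  have dc : columns ∣ (m + 1) / 2 := Int.dvd_of_emod_eq_zero hc
  by_cases hm : m % 2 = 0
  · -- an even return to (0,0) needs a full period
    have he : (m + 1) / 2 = m / 2 := by omega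
    rw [he] at dc
    have hpos2 : 0 < m / 2 := by omega
    have hlcm := pv_lcm_dvd rows columns (m/2) hpos2 dr dc
    have hle := Int.le_of_dvd hpos2 hlcm
    unfold pvT at h2
    omega
  · -- an odd return to (0,0) forces gcd = 1, hence a full grid
    have he : (m + 1) / 2 = m / 2 + 1 := by omega
    rw [he] at dc
    have hg1 : (Int.gcd rows columns : Int) ∣ m / 2 :=
      dvd_trans (Int.gcd_dvd_left rows columns) dr
    have hg2 : (Int.gcd rows columns : Int) ∣ m / 2 + 1 :=
      dvd_trans (Int.gcd_dvd_right rows columns) dc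
    have hg3 : (Int.gcd rows columns : Int) ∣ 1 := by
      have := dvd_sub hg2 hg1
      simpa using this
    have hgpos : 1 ≤ (Int.gcd rows columns : Int) := by
      have := Int.gcd_pos_of_ne_zero_left columns (a := rows) (by omega)
      omega
    have hgle := Int.le_of_dvd (by norm_num) hg3
    have : Int.gcd rows columns = 1 := by omega
    exact hnofull (pvCover rows columns hR hC this)

-- ---------- phase 1 of B: the stopping index ----------

lemma pvFindLast_spec (rows columns : Int) (hR : 1 ≤ rows) (hC : 1 ≤ columns) :
    ∀ d : Nat, ∀ n : Int, 0 ≤ n → n ≤ pvT rows columns → (pvT rows columns - n).toNat = d →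
      ((n - 1 ≤ pvFindLast rows columns (PySem.List.pyRange n (pvT rows columns) 1)
          (pvCov rows columns (n - 1)) (pvT rows columns - 1) ∧
        pvFindLast rows columns (PySem.List.pyRange n (pvT rows columns) 1)
          (pvCov rows columns (n - 1)) (pvT rows columns - 1) ≤ pvT rows columns - 1) ∧
       ((pvFull rows columns (pvFindLast rows columns (PySem.List.pyRange n (pvT rows columns) 1)
            (pvCov rows columns (n - 1)) (pvT rows columns - 1)) ∧
         n ≤ pvFindLast rows columns (PySem.List.pyRange n (pvT rows columns) 1)
            (pvCov rows columns (n - 1)) (pvT rows columns - 1)) ∨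
        (pvFindLast rows columns (PySem.List.pyRange n (pvT rows columns) 1)
            (pvCov rows columns (n - 1)) (pvT rows columns - 1) = pvT rows columns - 1 ∧
         ∀ m, n ≤ m → m ≤ pvT rows columns - 1 → ¬ pvFull rows columns m)) ∧
       (∀ m, n ≤ m →
          m < pvFindLast rows columns (PySem.List.pyRange n (pvT rows columns) 1)
            (pvCov rows columns (n - 1)) (pvT rows columns - 1) →
          ¬ pvFull rows columns m)) := by
  intro d
  induction d with
  | zero =>
    intro n hn hnT hd
    have hnT' : n = pvT rows columns := by omega
    subst hnT'
    rw [PySem.List.pyRange_one_eq_nil le_rfl]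
    have hres : pvFindLast rows columns ([] : List Int)
        (pvCov rows columns (pvT rows columns - 1)) (pvT rows columns - 1)
        = pvT rows columns - 1 := rfl
    rw [hres]
    have hT := pvT_bounds rows columns hR hC
    refine ⟨⟨by omega, le_rfl⟩, Or.inr ⟨rfl, ?_⟩, ?_⟩
    · intro m hm1 hm2
      exact ((by omega : False)).elim
    · intro m hm1 hm2
      exact ((by omega : False)).elim
  | succ d ih =>
    intro n hn hnT hd
    have hlt : n < pvT rows columns := by omega
    rw [PySem.List.pyRange_one_cons hlt]
    have hseen : PySem.Set.add (pvCov rows columns (n-1)) (pvPos rows columns n)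
        = pvCov rows columns n := (pvCov_succ rows columns n hn).symm
    simp only [pvFindLast, hseen]
    by_cases hfull : PySem.Set.len (pvCov rows columns n) = rows * columns
    · rw [if_pos hfull]
      refine ⟨⟨by omega, by omega⟩, Or.inl ⟨hfull, le_rfl⟩, ?_⟩
      intro m hm1 hm2
      exact ((by omega : False)).elim
    · rw [if_neg hfull]
      have hcov : pvCov rows columns n = pvCov rows columns (n + 1 - 1) := by
        rw [show n + 1 - 1 = n by ring]
      rw [hcov]
      obtain ⟨⟨p1, p2⟩, p3, p4⟩ := ih (n+1) (by omega) (by omega) (by omega)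
      refine ⟨⟨by omega, p2⟩, ?_, ?_⟩
      · rcases p3 with ⟨q1, q2⟩ | ⟨q1, q2⟩
        · exact Or.inl ⟨q1, by omega⟩
        · refine Or.inr ⟨q1, ?_⟩
          intro m hm1 hm2
          by_cases hmn : m = n
          · subst hmn; exact hfull
          · exact q2 m (by omega) hm2
      · intro m hm1 hm2
        by_cases hmn : m = n
        · subst hmn; exact hfull
        · exact p4 m (by omega) hm2

-- ---------- the (0,0) cell of the final grid in the no-fill case ----------

lemma pvCell00 (rows columns : Int) (hR : 1 ≤ rows) (hC : 1 ≤ columns)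
    (hnofull : ¬ pvFull rows columns (pvT rows columns - 1)) :
    ∀ n : Int, 0 ≤ n → n ≤ pvT rows columns - 1 →
      pvCell (pvG rows columns n) 0 0 = 1 := by
  intro n hn
  induction n, hn using Int.le_induction with
  | base =>
    intro _
    rw [pvG_zero rows columns hR hC,
      pvCell_set2 rows columns _ 0 0 1 0 0 (pvShape_zeros rows columns)
        le_rfl (by omega) le_rfl (by omega) le_rfl (by omega) le_rfl (by omega)]
    simp
  | succ n hn ih =>
    intro hle
    obtain ⟨b1, b2, b3, b4⟩ := pvPos_bounds rows columns (n+1) (by omega) (by omega)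
    have hne : ¬ ((pvPos rows columns (n+1)).1 = 0 ∧ (pvPos rows columns (n+1)).2 = 0) := by
      intro ⟨h1, h2⟩
      exact pv00 rows columns (n+1) hR hC (by omega) (by omega) hnofull
        (Prod.ext h1 h2)
    rw [pvG_succ rows columns n hn]
    unfold pvWrite
    rw [pvCell_set2 rows columns _ _ _ _ 0 0 (pvG_inv rows columns hR hC n hn).1
      b1 b2 b3 b4 le_rfl (by omega) le_rfl (by omega), if_neg hne]
    exact ih (by omega)

-- ---------- the main loop correspondence ----------

lemma pvLoopA_main (rows columns S : Int) (hR : 1 ≤ rows) (hC : 1 ≤ columns)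
    (hS0 : 0 ≤ S) (hST : S ≤ pvT rows columns - 1)
    (hSfull : pvFull rows columns S ∨
      (S = pvT rows columns - 1 ∧ ∀ m, 0 ≤ m → m ≤ pvT rows columns - 1 → ¬ pvFull rows columns m))
    (hSmin : ∀ m, 0 ≤ m → m < S → ¬ pvFull rows columns m) :
    ∀ fuel : Nat, ∀ n : Int, 0 ≤ n →
      (n ≤ S ∨ (n = pvT rows columns ∧ ¬ pvFull rows columns S)) →
      S + 3 - n ≤ (fuel : Int) →
      pvLoopA rows columns fuel (pvG rows columns n) (n + 1)
          (pvPos rows columns n).1 (pvPos rows columns n).2 (pvEdges rows columns n)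
        = pvG rows columns S := by
  have hT := pvT_bounds rows columns hR hC
  intro fuel
  induction fuel with
  | zero =>
    intro n hn hcase hfuel
    exfalso
    rcases hcase with h | ⟨hnT, hnf⟩
    · simp only [Nat.cast_zero] at hfuel; omega
    · rcases hSfull with hf | ⟨hSeq, -⟩
      · exact hnf hf
      · simp only [Nat.cast_zero] at hfuel; omega
  | succ fuel ihf =>
    intro n hn hcase hfuel
    obtain ⟨gS, gZ, gC⟩ := pvG_inv rows columns hR hC n hn
    simp only [pvLoopA]
    rw [gZ]
    by_cases hfull : pvFull rows columns n
    · -- the grid is complete: A stops, and n must be exactly S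
      unfold pvFull at hfull
      rw [if_pos (by omega)]
      have hnS : n = S := by
        rcases hcase with h | ⟨hnT, hnf⟩
        · by_contra hne
          exact hSmin n hn (by omega) (by unfold pvFull; omega)
        · exfalso
          rcases hSfull with hfS | ⟨hSeq, hnofull⟩
          · exact hnf hfS
          · have hTpos := pvPos_T rows columns hR hC
            have hc := pvCov_succ rows columns (pvT rows columns) (by omega)
            have hmem : pvPos rows columns (pvT rows columns)
                ∈ pvCov rows columns (pvT rows columns - 1) := by
              rw [hTpos, pvCov_mem rows columns _ _ (by omega)]
              exact ⟨0, le_rfl, by omega, pvPos_zero rows columns (by omega) (by omega)⟩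
            have hla := pvLen_add (pvCov rows columns (pvT rows columns - 1))
              (pvPos rows columns (pvT rows columns))
            have hnf2 := hnofull (pvT rows columns - 1) (by omega) (by omega)
            unfold pvFull at hnf2
            rw [hnT, hc, hla, if_pos hmem] at hfull
            omega
      rw [hnS]
    · -- the grid is not complete: A makes a move
      unfold pvFull at hfull
      have hlen_le := pvCov_le rows columns n hR hC hn
      rw [if_neg (by omega)]
      have hnotriv : ¬ (rows = 1 ∧ columns = 1) := by
        intro h11
        have h0 := pvFull_zero_of_one_one rows columns h11
        have hm := pvFull_mono rows columns 0 n hR hC le_rfl hn h0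
        unfold pvFull at hm
        omega
      obtain ⟨b1, b2, b3, b4⟩ := pvPos_bounds rows columns n (by omega) (by omega)
      have hTeven : pvT rows columns % 2 = 0 := by unfold pvT; omega
      by_cases hpar : PySem.Int.mod (n + 1) 2 = 1
      · -- odd step number: column move
        have hne : n % 2 = 0 := (pv_parity_now n).mp hpar
        rw [if_pos hpar]
        have hsucc := pvPos_succ_even rows columns n (by omega) (by omega) hne
        have hwrap : (if (pvPos rows columns n).2 + 1 = columns then 0
            else (pvPos rows columns n).2 + 1) = ((pvPos rows columns n).2 + 1) % columns :=
          (pv_wrapmod _ _ b3 b4).symm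
        rw [hwrap]
        have hedge : [(pvPos rows columns n).1, (pvPos rows columns n).2,
            (pvPos rows columns n).1, ((pvPos rows columns n).2 + 1) % columns]
            = pvE rows columns (n + 1) := by
          unfold pvE
          rw [show n + 1 - 1 = n by ring, hsucc]
        rw [hedge]
        by_cases hnT : n = pvT rows columns
        · -- closing step of the period: the edge repeats the very first edge
          have hnfS : ¬ pvFull rows columns S := by
            rcases hcase with h | ⟨-, h⟩
            · exact ((by omega : False)).elim
            · exact h
          have hSeq : S = pvT rows columns - 1 := by
            rcases hSfull with hf | ⟨h, -⟩
            · exact absurd hf hnfS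
            · exact h
          have hnofull : ∀ m, 0 ≤ m → m ≤ pvT rows columns - 1 → ¬ pvFull rows columns m := by
            rcases hSfull with hf | ⟨-, h⟩
            · exact absurd hf hnfS
            · exact h
          have hmem : pvE rows columns (n + 1) ∈ pvEdges rows columns n := by
            rw [pvEdges_mem]
            refine ⟨1, le_rfl, by omega, ?_⟩
            rw [hnT, show pvT rows columns + 1 = 1 + pvT rows columns by ring,
              pvE_period rows columns 1 hR hC]
          rw [if_pos hmem]
          have hp := pvPos_T rows columns hR hC
          have hp1 : (pvPos rows columns n).1 = 0 := by rw [hnT, hp]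
          have hp2 : (pvPos rows columns n).2 = 0 := by rw [hnT, hp]
          have hval : n + 1 - ((pvEdges rows columns n).length : Int) = 1 := by
            rw [pvEdges_length rows columns n hn]; ring
          rw [hp1, hp2, hval]
          -- pvSet2 (pvG T) 0 0 1 = pvG (T-1) = pvG S
          have hGsh := (pvG_inv rows columns hR hC (pvT rows columns - 1) (by omega)).1
          have hG : pvG rows columns n
              = pvSet2 (pvG rows columns (pvT rows columns - 1)) 0 0 (pvT rows columns + 1) := by
            rw [hnT, show pvT rows columns = (pvT rows columns - 1) + 1 by ring,
              pvG_succ rows columns (pvT rows columns - 1) (by omega)]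
            unfold pvWrite
            rw [show pvT rows columns - 1 + 1 = pvT rows columns by ring, hp]
          rw [hG, pvSet2_set2 rows columns _ 0 0 _ 1 hGsh le_rfl (by omega) le_rfl]
          have hcell := pvCell00 rows columns hR hC
            (hnofull (pvT rows columns - 1) (by omega) (by omega))
            (pvT rows columns - 1) (by omega) le_rfl
          have hself := pvSet2_self rows columns (pvG rows columns (pvT rows columns - 1)) 0 0
            hGsh le_rfl (by omega) le_rfl (by omega)
          rw [hcell] at hself
          rw [hself, hSeq]
        · -- ordinary step: the edge is fresh
          have hnltT : n < pvT rows columns := by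
            rcases hcase with h | ⟨h, -⟩
            · omega
            · exact absurd h hnT
          have hmem : ¬ (pvE rows columns (n + 1) ∈ pvEdges rows columns n) := by
            intro hmem
            obtain ⟨k, hk1, hk2, hk3⟩ := (pvEdges_mem rows columns n _).mp hmem
            exact pv_norepeat rows columns k (n+1) hR hC hk1 (by omega)
              (by omega) hnotriv hk3
          rw [if_neg hmem]
          have harg1 : pvSet2 (pvG rows columns n) (pvPos rows columns n).1
              (((pvPos rows columns n).2 + 1) % columns) (n + 1 + 1)
              = pvG rows columns (n + 1) := by
            rw [pvG_succ rows columns n hn]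
            unfold pvWrite
            rw [hsucc]
          have harg2 : pvEdges rows columns n ++ [pvE rows columns (n + 1)]
              = pvEdges rows columns (n + 1) := (pvEdges_succ rows columns n hn).symm
          rw [harg1, harg2]
          have hcase' : n + 1 ≤ S ∨ (n + 1 = pvT rows columns ∧ ¬ pvFull rows columns S) := by
            by_cases hns : n = S
            · subst hns
              rcases hSfull with hf | ⟨hSeq, -⟩
              · exact absurd (by unfold pvFull; omega : ¬ pvFull rows columns n) (by
                  intro hcontra; exact hcontra hf)
              · exact Or.inr ⟨by omega, by unfold pvFull; omega⟩
            · rcases hcase with h | ⟨h, -⟩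
              · exact Or.inl (by omega)
              · exact absurd h hnT
          have hmain := ihf (n+1) (by omega) hcase' (by push_cast at hfuel ⊢; omega)
          rw [show (pvPos rows columns (n+1)).1 = (pvPos rows columns n).1 from by rw [hsucc],
            show (pvPos rows columns (n+1)).2 = ((pvPos rows columns n).2 + 1) % columns
              from by rw [hsucc]] at hmain
          exact hmain
      · -- even step number: row move
        have hno : n % 2 = 1 := by
          rw [pv_parity_now] at hpar
          omega
        rw [if_neg hpar]
        have hsucc := pvPos_succ_odd rows columns n (by omega) (by omega) hno
        have hwrap : (if (pvPos rows columns n).1 + 1 = rows then 0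
            else (pvPos rows columns n).1 + 1) = ((pvPos rows columns n).1 + 1) % rows :=
          (pv_wrapmod _ _ b1 b2).symm
        rw [hwrap]
        have hedge : [(pvPos rows columns n).1, (pvPos rows columns n).2,
            ((pvPos rows columns n).1 + 1) % rows, (pvPos rows columns n).2]
            = pvE rows columns (n + 1) := by
          unfold pvE
          rw [show n + 1 - 1 = n by ring, hsucc]
        rw [hedge]
        have hnT : n ≠ pvT rows columns := by
          intro h
          rw [h] at hno
          omega
        have hnltT : n < pvT rows columns := by
          rcases hcase with h | ⟨h, -⟩
          · omega
          · exact absurd h hnT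
        have hmem : ¬ (pvE rows columns (n + 1) ∈ pvEdges rows columns n) := by
          intro hmem
          obtain ⟨k, hk1, hk2, hk3⟩ := (pvEdges_mem rows columns n _).mp hmem
          exact pv_norepeat rows columns k (n+1) hR hC hk1 (by omega)
            (by omega) hnotriv hk3
        rw [if_neg hmem]
        have harg1 : pvSet2 (pvG rows columns n) (((pvPos rows columns n).1 + 1) % rows)
            (pvPos rows columns n).2 (n + 1 + 1)
            = pvG rows columns (n + 1) := by
          rw [pvG_succ rows columns n hn]
          unfold pvWrite
          rw [hsucc]
        have harg2 : pvEdges rows columns n ++ [pvE rows columns (n + 1)]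
            = pvEdges rows columns (n + 1) := (pvEdges_succ rows columns n hn).symm
        rw [harg1, harg2]
        have hcase' : n + 1 ≤ S ∨ (n + 1 = pvT rows columns ∧ ¬ pvFull rows columns S) := by
          by_cases hns : n = S
          · subst hns
            rcases hSfull with hf | ⟨hSeq, -⟩
            · exact absurd (by unfold pvFull; omega : ¬ pvFull rows columns n) (by
                intro hcontra; exact hcontra hf)
            · exact Or.inr ⟨by omega, by unfold pvFull; omega⟩
          · rcases hcase with h | ⟨h, -⟩
            · exact Or.inl (by omega)
            · exact absurd h hnT
        have hmain := ihf (n+1) (by omega) hcase' (by push_cast at hfuel ⊢; omega)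
        rw [show (pvPos rows columns (n+1)).1 = ((pvPos rows columns n).1 + 1) % rows
            from by rw [hsucc],
          show (pvPos rows columns (n+1)).2 = (pvPos rows columns n).2 from by rw [hsucc]]
          at hmain
        exact hmain

-- ===== VERDICT (by name: the statement is the Claim_ definition above) =====
theorem solution_spec : Claim_equal_solution := by
  intro rows columns _ hpre
  obtain ⟨hR, hC⟩ := hpre
  have hT := pvT_bounds rows columns hR hC
  have hRC : 0 < rows * columns := mul_pos (by omega) (by omega)
  unfold Spec_solution
  -- name B's stopping index and extract its properties
  have hcovm1 : pvCov rows columns (0 - 1) = PySem.Set.empty := by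
    unfold pvCov
    rw [show (0:Int) - 1 + 1 = 0 by ring, PySem.List.pyRange_one_eq_nil le_rfl]
    rfl
  obtain ⟨⟨s1, s2⟩, s3, s4⟩ := pvFindLast_spec rows columns hR hC
    (pvT rows columns - 0).toNat 0 le_rfl (by omega) rfl
  set S := pvFindLast rows columns (PySem.List.pyRange 0 (pvT rows columns) 1)
    (pvCov rows columns (0 - 1)) (pvT rows columns - 1) with hSdef
  have hS0 : 0 ≤ S := by
    rcases s3 with ⟨-, h⟩ | ⟨h, -⟩ <;> omega
  -- B computes pvG S
  have hB : solution_alt rows columns = pvG rows columns S := by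
    show (PySem.List.pyRange 0
        (pvFindLast rows columns
          (PySem.List.pyRange 0 (PySem.Int.floordiv (2 * rows * columns) (Int.gcd rows columns)) 1)
          PySem.Set.empty
          (PySem.Int.floordiv (2 * rows * columns) (Int.gcd rows columns) - 1) + 1) 1).foldl
        (fun g m => pvSet2 g (pvPos rows columns m).1 (pvPos rows columns m).2 (m + 1))
        ((PySem.List.pyRange 0 rows 1).map (fun _ => List.replicate columns.toNat (0 : Int)))
      = pvG rows columns S
    rw [pvPeriod_eq rows columns hR hC, ← hcovm1, ← hSdef]
    rfl
  rw [hB]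
  -- A's initial state is the state after move 0
  have hz : (PySem.List.pyRange 0 rows 1).map
      (fun _ => (PySem.List.pyRange 0 columns 1).map (fun _ => (0 : Int)))
      = pvZeros rows columns := by
    unfold pvZeros
    apply List.map_congr_left
    intro x hx
    simp [List.map_const', PySem.List.length_pyRange_one]
  have hE0 : pvEdges rows columns 0 = [] := by
    unfold pvEdges
    rw [PySem.List.pyRange_one_eq_nil (by norm_num : (0:Int) + 1 ≤ 1)]
    rfl
  have hfuel : S + 3 - 0 ≤ ((pvFuel rows columns : Nat) : Int) := by
    have hcast : ((pvFuel rows columns : Nat) : Int) = 2 * rows * columns + 4 := by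
      unfold pvFuel
      omega
    omega
  have hSfull : pvFull rows columns S ∨
      (S = pvT rows columns - 1 ∧
        ∀ m, 0 ≤ m → m ≤ pvT rows columns - 1 → ¬ pvFull rows columns m) := by
    rcases s3 with ⟨h1, -⟩ | ⟨h1, h2⟩
    · exact Or.inl h1
    · exact Or.inr ⟨h1, fun m hm1 hm2 => h2 m hm1 hm2⟩
  have hmain := pvLoopA_main rows columns S hR hC hS0 s2 hSfull
    (fun m hm1 hm2 => s4 m hm1 hm2) (pvFuel rows columns) 0 le_rfl (Or.inl hS0) hfuel
  rw [pvPos_zero rows columns (by omega) (by omega), hE0] at hmain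
  simp only [zero_add] at hmain
  show pvLoopA rows columns (pvFuel rows columns)
      (pvSet2 ((PySem.List.pyRange 0 rows 1).map
        (fun _ => (PySem.List.pyRange 0 columns 1).map (fun _ => (0 : Int)))) 0 0 1) 1 0 0 []
    = pvG rows columns S
  rw [hz, ← pvG_zero rows columns hR hC]
  exact hmain
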